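-- pv_equiv track=rewrite | github.com/mogascan/portfolio-risk-tracker | backend/app/services/ai/context_providers/news.py | _prioritize_sources
-- ===== SOURCE A (Python) =====
-- from typing import Dict, List, Any, Optional
--
-- def _prioritize_sources(keywords: List[str], is_news_query: bool = False) -> List[str]:
--     """
--     Prioritize which news sources to check based on keywords and intent.
--
--     Args:
--         keywords: Extracted keywords from query
--         is_news_query: Whether this is explicitly a news query
--
--     Returns:
--         Ordered list of sources to check
--     """
--     # Default order
--     sources = ["crypto", "macro", "reddit", "bitcoin", "messari"]
--
--     # Keywords that suggest specific sources
--     bitcoin_keywords = {"bitcoin", "btc", "satoshi", "lightning", "halving"}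
--     crypto_keywords = {"ethereum", "eth", "solana", "sol", "cardano", "ada", "defi", "nft", "altcoin"}
--     macro_keywords = {"fed", "interest", "rates", "economy", "inflation", "regulation", "sec"}
--
--     # Check for overlaps
--     has_bitcoin = any(kw.lower() in bitcoin_keywords for kw in keywords)
--     has_crypto = any(kw.lower() in crypto_keywords for kw in keywords)
--     has_macro = any(kw.lower() in macro_keywords for kw in keywords)
--
--     # Prioritize based on matches
--     if has_bitcoin:
--         # Move bitcoin to front
--         sources.remove("bitcoin")
--         sources.insert(0, "bitcoin")
--
--     if has_macro:
--         # Move macro economics to front/second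
--         sources.remove("macro")
--         if has_bitcoin:
--             sources.insert(1, "macro")
--         else:
--             sources.insert(0, "macro")
--
--     if has_crypto and not has_bitcoin:
--         # Move crypto to front if not already prioritizing bitcoin
--         sources.remove("crypto")
--         sources.insert(0, "crypto")
--
--     # For explicit news queries with no specific focus, ensure crypto is first
--     if is_news_query and not (has_bitcoin or has_macro or has_crypto):
--         if "crypto" in sources:
--             sources.remove("crypto")
--             sources.insert(0, "crypto")
--
--     return sources
-- ===== SOURCE B (Python) =====
-- def _prioritize_sources(keywords, is_news_query=False):
--     bitcoin_keywords = {"bitcoin", "btc", "satoshi", "lightning", "halving"}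
--     crypto_keywords = {"ethereum", "eth", "solana", "sol", "cardano", "ada", "defi", "nft", "altcoin"}
--     macro_keywords = {"fed", "interest", "rates", "economy", "inflation", "regulation", "sec"}
--
--     # one pass over the keywords computing all three flags
--     has_bitcoin = has_crypto = has_macro = False
--     for kw in keywords:
--         k = kw.lower()
--         has_bitcoin = has_bitcoin or k in bitcoin_keywords
--         has_crypto = has_crypto or k in crypto_keywords
--         has_macro = has_macro or k in macro_keywords
--
--     # the result is a pure function of the flags: return it directly
--     if has_bitcoin:
--         if has_macro:
--             return ["bitcoin", "macro", "crypto", "reddit", "messari"]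
--         return ["bitcoin", "crypto", "macro", "reddit", "messari"]
--     if has_macro and not has_crypto:
--         return ["macro", "crypto", "reddit", "bitcoin", "messari"]
--     return ["crypto", "macro", "reddit", "bitcoin", "messari"]
-- ===== Notes on version B (the rewrite author's own statement) =====
-- stated objective: simpler
-- what changed: B computes the three keyword flags in a single pass and returns the final order directly from a four-way case analysis, replacing A's three separate any-scans and the chain of remove/insert list mutations.
import Mathlib
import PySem

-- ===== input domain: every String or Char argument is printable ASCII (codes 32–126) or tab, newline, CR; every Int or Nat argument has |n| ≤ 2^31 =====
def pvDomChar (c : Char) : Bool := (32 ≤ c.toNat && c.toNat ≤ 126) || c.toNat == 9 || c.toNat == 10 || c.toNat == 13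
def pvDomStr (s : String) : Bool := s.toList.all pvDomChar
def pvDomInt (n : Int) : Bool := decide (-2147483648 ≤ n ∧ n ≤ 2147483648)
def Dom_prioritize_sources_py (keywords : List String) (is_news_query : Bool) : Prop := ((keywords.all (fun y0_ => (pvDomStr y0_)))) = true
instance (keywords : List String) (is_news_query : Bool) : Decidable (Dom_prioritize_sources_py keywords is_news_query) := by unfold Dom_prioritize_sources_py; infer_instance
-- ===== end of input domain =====

-- B computes the three keyword flags in one pass and returns the order from a direct
-- case analysis on the flags, instead of A's three any-scans plus remove/insert mutations (objective: simpler).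


-- ===== PORT A =====
-- literal transliteration of A; list.remove never raises here because the removed
-- element is always present, so remove? is some and .getD never takes its default
def prioritize_sources_py (keywords : List String) (is_news_query : Bool) : List String :=
  let sources : List String := ["crypto", "macro", "reddit", "bitcoin", "messari"]
  let bitcoin_keywords : List String := ["bitcoin", "btc", "satoshi", "lightning", "halving"]
  let crypto_keywords : List String := ["ethereum", "eth", "solana", "sol", "cardano", "ada", "defi", "nft", "altcoin"]
  let macro_keywords : List String := ["fed", "interest", "rates", "economy", "inflation", "regulation", "sec"]
  let has_bitcoin := keywords.any (fun kw => bitcoin_keywords.contains (PySem.Str.lower kw))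
  let has_crypto := keywords.any (fun kw => crypto_keywords.contains (PySem.Str.lower kw))
  let has_macro := keywords.any (fun kw => macro_keywords.contains (PySem.Str.lower kw))
  let sources :=
    if has_bitcoin then
      PySem.List.insert ((PySem.List.remove? sources "bitcoin").getD sources) 0 "bitcoin"
    else sources
  let sources :=
    if has_macro then
      let s := (PySem.List.remove? sources "macro").getD sources
      if has_bitcoin then PySem.List.insert s 1 "macro" else PySem.List.insert s 0 "macro"
    else sources
  let sources :=
    if has_crypto && !has_bitcoin then
      PySem.List.insert ((PySem.List.remove? sources "crypto").getD sources) 0 "crypto"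
    else sources
  let sources :=
    if is_news_query && !(has_bitcoin || has_macro || has_crypto) then
      if sources.contains "crypto" then
        PySem.List.insert ((PySem.List.remove? sources "crypto").getD sources) 0 "crypto"
      else sources
    else sources
  sources

-- ===== PORT B =====
def prioritize_sources_py_alt (keywords : List String) (is_news_query : Bool) : List String :=
  let flags : Bool × Bool × Bool := keywords.foldl
    (fun f kw =>
      let k := PySem.Str.lower kw
      (f.1 || (["bitcoin", "btc", "satoshi", "lightning", "halving"] : List String).contains k,
       f.2.1 || (["ethereum", "eth", "solana", "sol", "cardano", "ada", "defi", "nft", "altcoin"] : List String).contains k,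
       f.2.2 || (["fed", "interest", "rates", "economy", "inflation", "regulation", "sec"] : List String).contains k))
    (false, false, false)
  if flags.1 then
    if flags.2.2 then ["bitcoin", "macro", "crypto", "reddit", "messari"]
    else ["bitcoin", "crypto", "macro", "reddit", "messari"]
  else if flags.2.2 && !flags.2.1 then ["macro", "crypto", "reddit", "bitcoin", "messari"]
  else ["crypto", "macro", "reddit", "bitcoin", "messari"]

-- ===== PRECONDITION & SPEC =====
def Spec_prioritize_sources_py (keywords : List String) (is_news_query : Bool) (out : List String) : Prop := out = prioritize_sources_py_alt keywords is_news_query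
instance (keywords : List String) (is_news_query : Bool) (out : List String) : Decidable (Spec_prioritize_sources_py keywords is_news_query out) := by unfold Spec_prioritize_sources_py; infer_instance

-- ===== CLAIM (what is proved, stated in full; the proofs are below) =====
def Claim_equal_prioritize_sources_py : Prop := ∀ (keywords : List String) (is_news_query : Bool), Dom_prioritize_sources_py keywords is_news_query → Spec_prioritize_sources_py keywords is_news_query (prioritize_sources_py keywords is_news_query)

-- ===== LEMMAS AND PROOFS =====

-- B's one-pass fold computes exactly the three any-scans
theorem pv_fold_flags (keywords : List String) (a b c : Bool) :
    keywords.foldl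
      (fun (f : Bool × Bool × Bool) kw =>
        let k := PySem.Str.lower kw
        (f.1 || (["bitcoin", "btc", "satoshi", "lightning", "halving"] : List String).contains k,
         f.2.1 || (["ethereum", "eth", "solana", "sol", "cardano", "ada", "defi", "nft", "altcoin"] : List String).contains k,
         f.2.2 || (["fed", "interest", "rates", "economy", "inflation", "regulation", "sec"] : List String).contains k))
      (a, b, c)
    = (a || keywords.any (fun kw => (["bitcoin", "btc", "satoshi", "lightning", "halving"] : List String).contains (PySem.Str.lower kw)),
       b || keywords.any (fun kw => (["ethereum", "eth", "solana", "sol", "cardano", "ada", "defi", "nft", "altcoin"] : List String).contains (PySem.Str.lower kw)),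
       c || keywords.any (fun kw => (["fed", "interest", "rates", "economy", "inflation", "regulation", "sec"] : List String).contains (PySem.Str.lower kw))) := by
  induction keywords generalizing a b c with
  | nil => simp
  | cons x xs ih =>
    rw [List.foldl_cons, ih]
    simp [Bool.or_assoc]

-- ===== VERDICT (by name: the statement is the Claim_ definition above) =====
theorem prioritize_sources_py_spec : Claim_equal_prioritize_sources_py := by
  intro keywords is_news_query _
  unfold Spec_prioritize_sources_py prioritize_sources_py prioritize_sources_py_alt
  rw [pv_fold_flags]
  cases hb : keywords.any (fun kw => (["bitcoin", "btc", "satoshi", "lightning", "halving"] : List String).contains (PySem.Str.lower kw)) <;>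
  cases hc : keywords.any (fun kw => (["ethereum", "eth", "solana", "sol", "cardano", "ada", "defi", "nft", "altcoin"] : List String).contains (PySem.Str.lower kw)) <;>
  cases hm : keywords.any (fun kw => (["fed", "interest", "rates", "economy", "inflation", "regulation", "sec"] : List String).contains (PySem.Str.lower kw)) <;>
  cases is_news_query <;> simp only [hb, hc, hm] <;> rfl
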